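-- pv_equiv track=rewrite | github.com/Zysishuiyears/Graph-Theory-B-coloring-of-Cartesian-products | src/legacy/code/best_pattern_search_linear.py | shift_flip_HV
-- ===== SOURCE A (Python) =====
-- def shift_flip_HV(H, V, m, n, a, b, flip_i, flip_j):
--     """
--     对 H,V 做 D_m×D_n 的自同构：先反射再平移（不交换因子）
--     这是在矩阵上直接做，速度快。
--     """
--     H2 = [[0]*n for _ in range(m)]
--     V2 = [[0]*n for _ in range(m)]
--     for i in range(m):
--         for j in range(n):
--             ii = (-i) % m if flip_i else i
--             jj = (-j) % n if flip_j else j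
--             i2 = (ii + a) % m
--             j2 = (jj + b) % n
--             H2[i2][j2] = H[i][j]
--             V2[i2][j2] = V[i][j]
--     return H2, V2
-- ===== SOURCE B (Python) =====
-- def shift_flip_HV(H, V, m, n, a, b, flip_i, flip_j):
--     """
--     Gather formulation: invert the reflect-then-shift permutation once per axis,
--     then build each output row directly from its source cells (no zero matrix,
--     no per-cell scatter).
--     """
--     if m <= 0:
--         return [], []
--     src_rows = [(-((p - a) % m)) % m if flip_i else (p - a) % m for p in range(m)]
--     src_cols = [(-((q - b) % n)) % n if flip_j else (q - b) % n for q in range(n)]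
--     H2 = [[H[si][sj] for sj in src_cols] for si in src_rows]
--     V2 = [[V[si][sj] for sj in src_cols] for si in src_rows]
--     return H2, V2
-- ===== Notes on version B (the rewrite author's own statement) =====
-- stated objective: alternative
-- what changed: Replaces the per-cell scatter into preallocated zero matrices by inverting the reflect-then-shift permutation per axis and gathering: two 1-D source-index tables are built once and each output row is produced directly as a comprehension over them.
import Mathlib
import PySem

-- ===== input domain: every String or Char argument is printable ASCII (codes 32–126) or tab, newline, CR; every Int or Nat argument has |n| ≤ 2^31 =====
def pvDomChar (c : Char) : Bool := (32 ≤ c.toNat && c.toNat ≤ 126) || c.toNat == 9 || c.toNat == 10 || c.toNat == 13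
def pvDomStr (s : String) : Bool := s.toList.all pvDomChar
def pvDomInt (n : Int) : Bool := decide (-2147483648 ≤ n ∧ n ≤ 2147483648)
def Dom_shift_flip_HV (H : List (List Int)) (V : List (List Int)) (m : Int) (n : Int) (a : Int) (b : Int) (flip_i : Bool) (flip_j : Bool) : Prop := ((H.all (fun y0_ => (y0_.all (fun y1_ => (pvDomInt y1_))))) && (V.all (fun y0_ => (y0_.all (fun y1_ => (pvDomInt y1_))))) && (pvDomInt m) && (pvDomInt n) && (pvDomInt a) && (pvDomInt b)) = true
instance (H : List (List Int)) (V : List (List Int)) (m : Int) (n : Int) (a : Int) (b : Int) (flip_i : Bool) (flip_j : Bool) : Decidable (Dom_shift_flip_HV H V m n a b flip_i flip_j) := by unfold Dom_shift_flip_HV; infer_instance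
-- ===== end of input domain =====

-- B replaces A's per-cell scatter into zero matrices by an inverse-permutation gather built
-- from two 1-D source-index tables (objective: alternative, same O(m*n) cost).

-- shared helper: M[i][j] (both Pythons read cells exactly like this; exact when the indices
-- are in range, which Pre_ guarantees wherever the loops run)
def pvCell (M : List (List Int)) (i j : Int) : Int :=
  PySem.List.pyGetD (PySem.List.pyGetD M i []) j 0

-- ===== PORT A =====
def shift_flip_HV (H : List (List Int)) (V : List (List Int)) (m : Int) (n : Int) (a : Int) (b : Int) (flip_i : Bool) (flip_j : Bool) : List (List Int) × List (List Int) :=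
  -- H2 = V2 = [[0]*n for _ in range(m)]  ([0]*n is replicate n.toNat 0: empty for n ≤ 0 — exact)
  let zeros : List (List Int) := (PySem.List.pyRange 0 m 1).map (fun _ => List.replicate n.toNat (0:Int))
  (PySem.List.pyRange 0 m 1).foldl (fun st i =>
    (PySem.List.pyRange 0 n 1).foldl (fun st j =>
      let ii := if flip_i then PySem.Int.mod (-i) m else i
      let jj := if flip_j then PySem.Int.mod (-j) n else j
      let i2 := PySem.Int.mod (ii + a) m
      let j2 := PySem.Int.mod (jj + b) n
      -- H2[i2][j2] = H[i][j]; V2[i2][j2] = V[i][j]  (indices in range whenever the loop runs)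
      (PySem.List.pySetD st.1 i2 (PySem.List.pySetD (PySem.List.pyGetD st.1 i2 []) j2 (pvCell H i j)),
       PySem.List.pySetD st.2 i2 (PySem.List.pySetD (PySem.List.pyGetD st.2 i2 []) j2 (pvCell V i j)))) st)
    (zeros, zeros)

-- ===== PORT B =====
def shift_flip_HV_alt (H : List (List Int)) (V : List (List Int)) (m : Int) (n : Int) (a : Int) (b : Int) (flip_i : Bool) (flip_j : Bool) : List (List Int) × List (List Int) :=
  if m ≤ 0 then ([], []) else
  let srcRows := (PySem.List.pyRange 0 m 1).map (fun p =>
    if flip_i then PySem.Int.mod (-(PySem.Int.mod (p - a) m)) m else PySem.Int.mod (p - a) m)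
  let srcCols := (PySem.List.pyRange 0 n 1).map (fun q =>
    if flip_j then PySem.Int.mod (-(PySem.Int.mod (q - b) n)) n else PySem.Int.mod (q - b) n)
  (srcRows.map (fun si => srcCols.map (fun sj => pvCell H si sj)),
   srcRows.map (fun si => srcCols.map (fun sj => pvCell V si sj)))

-- ===== PRECONDITION & SPEC =====
-- Pre_ excludes exactly the inputs on which the Python A raises IndexError: when both loops
-- run (m > 0 and n > 0) H and V must have at least m rows whose first m rows have at least n cells.
def Pre_shift_flip_HV (H : List (List Int)) (V : List (List Int)) (m : Int) (n : Int) (a : Int) (b : Int) (flip_i : Bool) (flip_j : Bool) : Prop :=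
  0 < m → 0 < n →
    (m.toNat ≤ H.length ∧ m.toNat ≤ V.length ∧
     (∀ r ∈ H.take m.toNat, n.toNat ≤ r.length) ∧ (∀ r ∈ V.take m.toNat, n.toNat ≤ r.length))
instance (H : List (List Int)) (V : List (List Int)) (m : Int) (n : Int) (a : Int) (b : Int) (flip_i : Bool) (flip_j : Bool) : Decidable (Pre_shift_flip_HV H V m n a b flip_i flip_j) := by unfold Pre_shift_flip_HV; infer_instance

def pvWitness_shift_flip_HV : List (List Int) × List (List Int) × Int × Int × Int × Int × Bool × Bool :=
  ([[1, 2], [3, 4]], [[5, 6], [7, 8]], 2, 2, 1, 0, true, false)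

def Spec_shift_flip_HV (H : List (List Int)) (V : List (List Int)) (m : Int) (n : Int) (a : Int) (b : Int) (flip_i : Bool) (flip_j : Bool) (out : List (List Int) × List (List Int)) : Prop := out = shift_flip_HV_alt H V m n a b flip_i flip_j
instance (H : List (List Int)) (V : List (List Int)) (m : Int) (n : Int) (a : Int) (b : Int) (flip_i : Bool) (flip_j : Bool) (out : List (List Int) × List (List Int)) : Decidable (Spec_shift_flip_HV H V m n a b flip_i flip_j out) := by unfold Spec_shift_flip_HV; infer_instance

-- ===== CLAIM (what is proved, stated in full; the proofs are below) =====
def Claim_equal_shift_flip_HV : Prop := ∀ (H : List (List Int)) (V : List (List Int)) (m : Int) (n : Int) (a : Int) (b : Int) (flip_i : Bool) (flip_j : Bool), Dom_shift_flip_HV H V m n a b flip_i flip_j → Pre_shift_flip_HV H V m n a b flip_i flip_j → Spec_shift_flip_HV H V m n a b flip_i flip_j (shift_flip_HV H V m n a b flip_i flip_j)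

-- ===== LEMMAS AND PROOFS =====

-- A's per-axis destination index and B's per-axis source index, as functions
def pvDest (flip : Bool) (mm sh i : Int) : Int :=
  PySem.Int.mod ((if flip then PySem.Int.mod (-i) mm else i) + sh) mm
def pvSrc (flip : Bool) (mm sh p : Int) : Int :=
  if flip then PySem.Int.mod (-(PySem.Int.mod (p - sh) mm)) mm else PySem.Int.mod (p - sh) mm

-- generic fold lemmas
theorem pvFoldlExt {α γ : Type} (f g : α → γ → α) (l : List γ) (x : α)
    (h : ∀ acc c, f acc c = g acc c) : l.foldl f x = l.foldl g x := by
  have hfg : f = g := funext fun acc => funext fun c => h acc c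
  rw [hfg]

theorem pvFoldlPair {α β γ : Type} (f : α → γ → α) (g : β → γ → β) (l : List γ) (x : α) (y : β) :
    l.foldl (fun p c => (f p.1 c, g p.2 c)) (x, y) = (l.foldl f x, l.foldl g y) := by
  induction l generalizing x y with
  | nil => rfl
  | cons c t ih => simpa using ih (f x c) (g y c)

theorem pvScatEq (M : List (List Int)) (k q : Nat) (x : Int) :
    M.set k ((M.getD k []).set q x) = M.modify k (fun r => r.set q x) := by
  by_cases h : k < M.length
  · apply List.ext_getElem?
    intro j
    rw [List.getElem?_set, List.getElem?_modify]
    by_cases hkj : k = j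
    · subst hkj
      simp [h]
    · simp [hkj]
  · have h1 : M.set k ((M.getD k []).set q x) = M := List.set_eq_of_length_le (by omega)
    have h2 : M.modify k (fun r => r.set q x) = M := List.modify_eq_self (by omega)
    rw [h1, h2]

theorem pvFoldlModifyCollapse {β γ : Type} (l : List γ) (k : Nat) (g : γ → β → β) (M : List β) :
    l.foldl (fun M c => M.modify k (g c)) M
      = M.modify k (fun r => l.foldl (fun r c => g c r) r) := by
  induction l generalizing M with
  | nil =>
    apply List.ext_getElem?
    intro j
    simp [List.getElem?_modify]
  | cons c t ih =>
    rw [List.foldl_cons, ih, List.modify_modify_eq]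
    rfl

theorem pvFoldlModifyLength {β γ : Type} (g : γ → Nat) (F : γ → β → β) (l : List γ) (M : List β) :
    (l.foldl (fun M c => (M.modify (g c) (F c) : List β)) M).length = M.length := by
  induction l generalizing M with
  | nil => rfl
  | cons c t ih => simpa [List.length_modify] using ih (M.modify (g c) (F c))

theorem pvFoldlModifyNe {β γ : Type} (g : γ → Nat) (F : γ → β → β) (l : List γ) (M : List β)
    (p : Nat) (h : ∀ c ∈ l, g c ≠ p) :
    (l.foldl (fun M c => (M.modify (g c) (F c) : List β)) M)[p]? = M[p]? := by
  induction l generalizing M with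
  | nil => rfl
  | cons c t ih =>
    rw [List.foldl_cons, ih _ (fun c' hc' => h c' (List.mem_cons_of_mem _ hc'))]
    have hne : g c ≠ p := h c List.mem_cons_self
    simp [hne]

theorem pvFoldlModifyUnique {β γ : Type} (g : γ → Nat) (F : γ → β → β) (l : List γ) (M : List β)
    (p : Nat) (c0 : γ) (hc : c0 ∈ l) (hg : g c0 = p) (hnd : (l.map g).Nodup) :
    (l.foldl (fun M c => (M.modify (g c) (F c) : List β)) M)[p]? = M[p]?.map (F c0) := by
  induction l generalizing M with
  | nil => cases hc
  | cons c t ih =>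
    rw [List.map_cons, List.nodup_cons] at hnd
    obtain ⟨hninT, hndT⟩ := hnd
    rw [List.foldl_cons]
    by_cases hcp : g c = p
    · have hnoT : ∀ c' ∈ t, g c' ≠ p := by
        intro c' hc' he
        exact hninT (List.mem_map.mpr ⟨c', hc', by rw [he, hcp]⟩)
      rw [pvFoldlModifyNe g F t _ p hnoT]
      have hFc : F c = F c0 := by
        rcases List.mem_cons.mp hc with h0 | h0
        · rw [h0]
        · exact absurd (List.mem_map.mpr ⟨c0, h0, by rw [hg, hcp]⟩) hninT
      simp [hcp, hFc]
    · have hc0T : c0 ∈ t := by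
        rcases List.mem_cons.mp hc with h0 | h0
        · exact absurd (h0 ▸ hg : g c = p) hcp
        · exact h0
      rw [ih _ hc0T hndT]
      simp [hcp]

-- integer arithmetic
theorem pvModPos (x mm : Int) (h : 0 < mm) : PySem.Int.mod x mm = x % mm :=
  PySem.Int.mod_eq_emod_of_pos h

theorem pvEmodAdd (x y mm : Int) : (x % mm + y) % mm = (x + y) % mm := by
  have h1 : x % mm + y = (x + y) + mm * (-(x / mm)) := by rw [Int.emod_def]; ring
  rw [h1, Int.add_mul_emod_self_left]

theorem pvNegEmod (x mm : Int) : (-(x % mm)) % mm = (-x) % mm := by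
  have h1 : -(x % mm) = -x + mm * (x / mm) := by rw [Int.emod_def]; ring
  rw [h1, Int.add_mul_emod_self_left]

theorem pvDest_nonneg (flip : Bool) (mm sh i : Int) (h : 0 < mm) : 0 ≤ pvDest flip mm sh i :=
  PySem.Int.mod_nonneg _ h

theorem pvSrc_nonneg (flip : Bool) (mm sh p : Int) (h : 0 < mm) : 0 ≤ pvSrc flip mm sh p := by
  unfold pvSrc; split <;> exact PySem.Int.mod_nonneg _ h

theorem pvSrc_lt (flip : Bool) (mm sh p : Int) (h : 0 < mm) : pvSrc flip mm sh p < mm := by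
  unfold pvSrc; split <;> exact PySem.Int.mod_lt _ h

theorem pvDest_src (flip : Bool) (mm sh p : Int) (h : 0 < mm) (hp : 0 ≤ p) (hpm : p < mm) :
    pvDest flip mm sh (pvSrc flip mm sh p) = p := by
  cases flip
  · simp only [pvDest, pvSrc, Bool.false_eq_true, if_false]
    rw [pvModPos _ _ h, pvModPos _ _ h, pvEmodAdd]
    have e2 : p - sh + sh = p := by ring
    rw [e2, Int.emod_eq_of_lt hp hpm]
  · simp only [pvDest, pvSrc, if_true]
    rw [pvModPos _ _ h, pvModPos _ _ h, pvModPos _ _ h, pvModPos _ _ h]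
    have e1 : (-((-((p - sh) % mm)) % mm)) % mm = (p - sh) % mm := by
      rw [pvNegEmod, neg_neg, Int.emod_emod_of_dvd _ dvd_rfl]
    rw [e1, pvEmodAdd]
    have e2 : p - sh + sh = p := by ring
    rw [e2, Int.emod_eq_of_lt hp hpm]

theorem pvSrc_dest (flip : Bool) (mm sh i : Int) (h : 0 < mm) (hi : 0 ≤ i) (him : i < mm) :
    pvSrc flip mm sh (pvDest flip mm sh i) = i := by
  cases flip
  · simp only [pvDest, pvSrc, Bool.false_eq_true, if_false]
    rw [pvModPos _ _ h, pvModPos _ _ h, sub_eq_add_neg, pvEmodAdd]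
    have e2 : i + sh + -sh = i := by ring
    rw [e2, Int.emod_eq_of_lt hi him]
  · simp only [pvDest, pvSrc, if_true]
    rw [pvModPos _ _ h, pvModPos _ _ h, pvModPos _ _ h, pvModPos _ _ h]
    rw [sub_eq_add_neg, pvEmodAdd]
    have e2 : (-i) % mm + sh + -sh = (-i) % mm := by ring
    rw [e2, Int.emod_emod_of_dvd _ dvd_rfl, pvNegEmod, neg_neg, Int.emod_eq_of_lt hi him]

-- row-level: scattering one source row into a fresh zero row equals the gathered row
theorem pvRow (X : List (List Int)) (i0 n b : Int) (fj : Bool) (hn : 0 < n) :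
    (PySem.List.pyRange 0 n 1).foldl
        (fun r j => r.set (pvDest fj n b j).toNat (pvCell X i0 j)) (List.replicate n.toNat (0:Int))
      = ((PySem.List.pyRange 0 n 1).map (fun q => pvSrc fj n b q)).map (fun sj => pvCell X i0 sj) := by
  have hstep : ∀ (r : List Int) (j : Int),
      r.set (pvDest fj n b j).toNat (pvCell X i0 j)
        = r.modify (pvDest fj n b j).toNat (fun _ => pvCell X i0 j) :=
    fun r j => List.set_eq_modify _ _ _
  rw [pvFoldlExt _ _ _ _ hstep]
  apply List.ext_getElem?
  intro q
  by_cases hq : q < n.toNat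
  · have hq' : ((q : Int)) < n := by omega
    have hmem : pvSrc fj n b q ∈ PySem.List.pyRange 0 n 1 :=
      PySem.List.mem_pyRange_one.mpr ⟨pvSrc_nonneg fj n b q hn, pvSrc_lt fj n b q hn⟩
    have hgj0 : (pvDest fj n b (pvSrc fj n b q)).toNat = q := by
      rw [pvDest_src fj n b q hn (by omega) hq']; omega
    have hnd : ((PySem.List.pyRange 0 n 1).map (fun j => (pvDest fj n b j).toNat)).Nodup := by
      apply List.Nodup.map_on ?_ (PySem.List.nodup_pyRange_one 0 n)
      intro x hx y hy hxy
      have hx' := PySem.List.mem_pyRange_one.mp hx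
      have hy' := PySem.List.mem_pyRange_one.mp hy
      have hd : pvDest fj n b x = pvDest fj n b y := by
        have h1 := pvDest_nonneg fj n b x hn
        have h2 := pvDest_nonneg fj n b y hn
        omega
      calc x = pvSrc fj n b (pvDest fj n b x) := (pvSrc_dest fj n b x hn hx'.1 hx'.2).symm
        _ = pvSrc fj n b (pvDest fj n b y) := by rw [hd]
        _ = y := pvSrc_dest fj n b y hn hy'.1 hy'.2
    rw [pvFoldlModifyUnique (fun j => (pvDest fj n b j).toNat)
          (fun j => fun _ => pvCell X i0 j) _ _ q (pvSrc fj n b q) hmem hgj0 hnd]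
    rw [List.getElem?_map, List.getElem?_map, PySem.List.getElem?_pyRange_one]
    simp [hq]
  · have hL1 : ((PySem.List.pyRange 0 n 1).foldl
        (fun r j => r.modify (pvDest fj n b j).toNat (fun _ => pvCell X i0 j))
        (List.replicate n.toNat (0:Int))).length = n.toNat := by
      rw [pvFoldlModifyLength]; simp
    have hL2 : (((PySem.List.pyRange 0 n 1).map (fun q => pvSrc fj n b q)).map
        (fun sj => pvCell X i0 sj)).length = n.toNat := by
      simp [PySem.List.length_pyRange_one]
    rw [List.getElem?_eq_none (by omega), List.getElem?_eq_none (by omega)]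

-- matrix-level: A's double scatter loop on one matrix equals B's gather for that matrix
theorem pvSingle (X : List (List Int)) (m n a b : Int) (fi fj : Bool) (hm : 0 < m) (hn : 0 < n) :
    (PySem.List.pyRange 0 m 1).foldl (fun M i =>
        (PySem.List.pyRange 0 n 1).foldl (fun M j =>
          PySem.List.pySetD M (pvDest fi m a i)
            (PySem.List.pySetD (PySem.List.pyGetD M (pvDest fi m a i) []) (pvDest fj n b j)
              (pvCell X i j))) M)
      ((PySem.List.pyRange 0 m 1).map (fun _ => List.replicate n.toNat (0:Int)))
    = ((PySem.List.pyRange 0 m 1).map (fun p => pvSrc fi m a p)).map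
        (fun si => ((PySem.List.pyRange 0 n 1).map (fun q => pvSrc fj n b q)).map
          (fun sj => pvCell X si sj)) := by
  have hstep : ∀ (M : List (List Int)) (i : Int),
      (PySem.List.pyRange 0 n 1).foldl (fun M j =>
          PySem.List.pySetD M (pvDest fi m a i)
            (PySem.List.pySetD (PySem.List.pyGetD M (pvDest fi m a i) []) (pvDest fj n b j)
              (pvCell X i j))) M
        = M.modify (pvDest fi m a i).toNat (fun r =>
            (PySem.List.pyRange 0 n 1).foldl
              (fun r j => r.set (pvDest fj n b j).toNat (pvCell X i j)) r) := by
    intro M i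
    have h1 : ∀ (M : List (List Int)) (j : Int),
        PySem.List.pySetD M (pvDest fi m a i)
          (PySem.List.pySetD (PySem.List.pyGetD M (pvDest fi m a i) []) (pvDest fj n b j)
            (pvCell X i j))
          = M.modify (pvDest fi m a i).toNat
              (fun r => r.set (pvDest fj n b j).toNat (pvCell X i j)) := by
      intro M j
      rw [PySem.List.pySetD_of_nonneg _ _ (pvDest_nonneg fj n b j hn),
          PySem.List.pySetD_of_nonneg _ _ (pvDest_nonneg fi m a i hm),
          PySem.List.pyGetD_of_nonneg _ _ (pvDest_nonneg fi m a i hm),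
          pvScatEq]
    rw [pvFoldlExt _ _ _ _ h1, pvFoldlModifyCollapse]
  rw [pvFoldlExt _ _ _ _ hstep]
  apply List.ext_getElem?
  intro p
  by_cases hp : p < m.toNat
  · have hp' : ((p : Int)) < m := by omega
    have hmem : pvSrc fi m a p ∈ PySem.List.pyRange 0 m 1 :=
      PySem.List.mem_pyRange_one.mpr ⟨pvSrc_nonneg fi m a p hm, pvSrc_lt fi m a p hm⟩
    have hgi0 : (pvDest fi m a (pvSrc fi m a p)).toNat = p := by
      rw [pvDest_src fi m a p hm (by omega) hp']; omega
    have hnd : ((PySem.List.pyRange 0 m 1).map (fun i => (pvDest fi m a i).toNat)).Nodup := by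
      apply List.Nodup.map_on ?_ (PySem.List.nodup_pyRange_one 0 m)
      intro x hx y hy hxy
      have hx' := PySem.List.mem_pyRange_one.mp hx
      have hy' := PySem.List.mem_pyRange_one.mp hy
      have hd : pvDest fi m a x = pvDest fi m a y := by
        have h1 := pvDest_nonneg fi m a x hm
        have h2 := pvDest_nonneg fi m a y hm
        omega
      calc x = pvSrc fi m a (pvDest fi m a x) := (pvSrc_dest fi m a x hm hx'.1 hx'.2).symm
        _ = pvSrc fi m a (pvDest fi m a y) := by rw [hd]
        _ = y := pvSrc_dest fi m a y hm hy'.1 hy'.2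
    rw [pvFoldlModifyUnique (fun i => (pvDest fi m a i).toNat)
          (fun i => fun row => (PySem.List.pyRange 0 n 1).foldl
            (fun rr j => rr.set (pvDest fj n b j).toNat (pvCell X i j)) row)
          (PySem.List.pyRange 0 m 1)
          ((PySem.List.pyRange 0 m 1).map (fun _ => List.replicate n.toNat (0:Int)))
          p (pvSrc fi m a p) hmem hgi0 hnd]
    rw [List.getElem?_map, List.getElem?_map, List.getElem?_map, PySem.List.getElem?_pyRange_one]
    have hp2 : p < (m - 0).toNat := by omega
    simp only [hp2, if_true, Option.map_some, zero_add]
    rw [pvRow X (pvSrc fi m a ((p:Int))) n b fj hn]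
  · have hL1 : ((PySem.List.pyRange 0 m 1).foldl (fun M i =>
        M.modify (pvDest fi m a i).toNat (fun r =>
          (PySem.List.pyRange 0 n 1).foldl
            (fun r j => r.set (pvDest fj n b j).toNat (pvCell X i j)) r))
        ((PySem.List.pyRange 0 m 1).map (fun _ => List.replicate n.toNat (0:Int)))).length
        = m.toNat := by
      rw [pvFoldlModifyLength]; simp [PySem.List.length_pyRange_one]
    have hL2 : (((PySem.List.pyRange 0 m 1).map (fun p => pvSrc fi m a p)).map
        (fun si => ((PySem.List.pyRange 0 n 1).map (fun q => pvSrc fj n b q)).map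
          (fun sj => pvCell X si sj))).length = m.toNat := by
      simp [PySem.List.length_pyRange_one]
    rw [List.getElem?_eq_none (by omega), List.getElem?_eq_none (by omega)]

-- ===== VERDICT (by name: the statement is the Claim_ definition above) =====
theorem shift_flip_HV_spec : Claim_equal_shift_flip_HV := by
  intro H V m n a b fi fj _dom _pre
  unfold Spec_shift_flip_HV shift_flip_HV shift_flip_HV_alt
  by_cases hm : m ≤ 0
  · simp [hm, PySem.List.pyRange_one_eq_nil hm]
  rw [if_neg hm]
  replace hm : 0 < m := by omega
  by_cases hn : n ≤ 0
  · have h0 : n.toNat = 0 := Int.toNat_of_nonpos hn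
    simp [PySem.List.pyRange_one_eq_nil hn, h0, List.map_map, Function.comp_def,
      List.map_const', PySem.List.length_pyRange_one]
  · replace hn : 0 < n := by omega
    have hsplit : ∀ (st : List (List Int) × List (List Int)) (i : Int),
        (PySem.List.pyRange 0 n 1).foldl (fun st j =>
          (PySem.List.pySetD st.1 (PySem.Int.mod ((if fi then PySem.Int.mod (-i) m else i) + a) m)
              (PySem.List.pySetD (PySem.List.pyGetD st.1 (PySem.Int.mod ((if fi then PySem.Int.mod (-i) m else i) + a) m) [])
                (PySem.Int.mod ((if fj then PySem.Int.mod (-j) n else j) + b) n) (pvCell H i j)),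
           PySem.List.pySetD st.2 (PySem.Int.mod ((if fi then PySem.Int.mod (-i) m else i) + a) m)
              (PySem.List.pySetD (PySem.List.pyGetD st.2 (PySem.Int.mod ((if fi then PySem.Int.mod (-i) m else i) + a) m) [])
                (PySem.Int.mod ((if fj then PySem.Int.mod (-j) n else j) + b) n) (pvCell V i j)))) st
        = ((PySem.List.pyRange 0 n 1).foldl (fun M j =>
              PySem.List.pySetD M (pvDest fi m a i)
                (PySem.List.pySetD (PySem.List.pyGetD M (pvDest fi m a i) []) (pvDest fj n b j) (pvCell H i j))) st.1,
           (PySem.List.pyRange 0 n 1).foldl (fun M j =>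
              PySem.List.pySetD M (pvDest fi m a i)
                (PySem.List.pySetD (PySem.List.pyGetD M (pvDest fi m a i) []) (pvDest fj n b j) (pvCell V i j))) st.2) := by
      intro st i
      exact pvFoldlPair
        (fun M j => PySem.List.pySetD M (pvDest fi m a i)
          (PySem.List.pySetD (PySem.List.pyGetD M (pvDest fi m a i) []) (pvDest fj n b j) (pvCell H i j)))
        (fun M j => PySem.List.pySetD M (pvDest fi m a i)
          (PySem.List.pySetD (PySem.List.pyGetD M (pvDest fi m a i) []) (pvDest fj n b j) (pvCell V i j)))
        (PySem.List.pyRange 0 n 1) st.1 st.2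
    show (PySem.List.pyRange 0 m 1).foldl _ _ = _
    rw [pvFoldlExt _ _ _ _ hsplit]
    exact (pvFoldlPair
        (fun M i => (PySem.List.pyRange 0 n 1).foldl (fun M j =>
          PySem.List.pySetD M (pvDest fi m a i)
            (PySem.List.pySetD (PySem.List.pyGetD M (pvDest fi m a i) []) (pvDest fj n b j)
              (pvCell H i j))) M)
        (fun M i => (PySem.List.pyRange 0 n 1).foldl (fun M j =>
          PySem.List.pySetD M (pvDest fi m a i)
            (PySem.List.pySetD (PySem.List.pyGetD M (pvDest fi m a i) []) (pvDest fj n b j)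
              (pvCell V i j))) M)
        (PySem.List.pyRange 0 m 1)
        ((PySem.List.pyRange 0 m 1).map (fun _ => List.replicate n.toNat (0:Int)))
        ((PySem.List.pyRange 0 m 1).map (fun _ => List.replicate n.toNat (0:Int)))).trans
      (congrArg₂ Prod.mk (pvSingle H m n a b fi fj hm hn) (pvSingle V m n a b fi fj hm hn))
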